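-- pv_equiv track=rewrite | github.com/AliAlfridawi/hackUTA2025 | final.py | likely_english
-- ===== SOURCE A (Python) =====
-- def likely_english(text: str) -> bool:
--     """Simple heuristic to guess if text is English when language_code is missing.
--     Counts common English function words; returns True if several are present.
--     """
--     if not text:
--         return False
--     text = text.lower()
--     common = [' the ', ' and ', ' is ', ' i ', ' you ', ' to ', ' of ', ' that ', ' it ']
--     count = 0
--     for w in common:
--         if w in f' {text} ':
--             count += 1
--     return count >= 2
-- ===== SOURCE B (Python) =====
-- def likely_english(text: str) -> bool:
--     common = {'the', 'and', 'is', 'i', 'you', 'to', 'of', 'that', 'it'}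
--     found = set()
--     for w in text.lower().split(' '):
--         if w in common:
--             found.add(w)
--             if len(found) >= 2:
--                 return True
--     return False
-- ===== Notes on version B (the rewrite author's own statement) =====
-- stated objective: alternative
-- what changed: B splits the text into tokens once and streams over the token list, accumulating the distinct common words seen in a set and returning True at the second one, instead of A's fixed loop of nine space-padded substring searches over a padded copy of the text.
import Mathlib
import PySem

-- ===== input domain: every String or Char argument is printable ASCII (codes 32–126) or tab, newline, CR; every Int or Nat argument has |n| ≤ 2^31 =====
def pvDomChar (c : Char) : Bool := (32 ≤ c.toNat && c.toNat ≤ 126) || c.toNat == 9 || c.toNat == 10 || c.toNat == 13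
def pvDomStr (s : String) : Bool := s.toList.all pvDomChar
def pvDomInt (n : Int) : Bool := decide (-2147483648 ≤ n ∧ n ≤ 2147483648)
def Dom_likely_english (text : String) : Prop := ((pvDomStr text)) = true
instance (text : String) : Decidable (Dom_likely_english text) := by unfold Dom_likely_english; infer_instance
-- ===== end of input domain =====

-- B streams over the tokens of the text (split on single spaces) once, collecting the distinct
-- common words it meets and returning early at the second one, instead of A's nine substring
-- searches over a space-padded copy (alternative decomposition; one pass over tokens).

-- ===== PORT A =====
-- literal transliteration of A: guard on empty text, lower, then a counting loop of
-- space-padded substring tests over the padded text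
def likely_english (text : String) : Bool :=
  if text.toList = [] then false
  else
    let t := PySem.Chars.lower text.toList
    let common : List (List Char) :=
      [" the ".toList, " and ".toList, " is ".toList, " i ".toList, " you ".toList,
       " to ".toList, " of ".toList, " that ".toList, " it ".toList]
    let count : Int :=
      common.foldl (fun c w => if PySem.Chars.isIn w (' ' :: t ++ [' ']) then c + 1 else c) 0
    decide (2 ≤ count)

-- ===== PORT B =====
-- literal transliteration of B's token loop: walk the token list, accumulate the distinct
-- common words seen in `found`, return True as soon as `found` has two elements
def bLoop (common : PySem.Set (List Char)) :
    PySem.Set (List Char) → List (List Char) → Bool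
  | _, [] => false
  | found, w :: rest =>
    if PySem.Set.contains common w then
      let found' := PySem.Set.add found w
      if 2 ≤ PySem.Set.len found' then true
      else bLoop common found' rest
    else bLoop common found rest

def likely_english_alt (text : String) : Bool :=
  let common : PySem.Set (List Char) :=
    PySem.Set.ofList
      ["the".toList, "and".toList, "is".toList, "i".toList, "you".toList,
       "to".toList, "of".toList, "that".toList, "it".toList]
  bLoop common PySem.Set.empty (PySem.Chars.splitOn (PySem.Chars.lower text.toList) [' '])

-- ===== PRECONDITION & SPEC =====
def Spec_likely_english (text : String) (out : Bool) : Prop := out = likely_english_alt text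
instance (text : String) (out : Bool) : Decidable (Spec_likely_english text out) := by unfold Spec_likely_english; infer_instance

-- ===== CLAIM (what is proved, stated in full; the proofs are below) =====
def Claim_equal_likely_english : Prop := ∀ (text : String), Dom_likely_english text → Spec_likely_english text (likely_english text)

-- ===== LEMMAS AND PROOFS =====

-- split on a single space, structurally (proof-side model of the single-space split)
def spSplit : List Char → List (List Char)
  | [] => [[]]
  | c :: r => if c = ' ' then [] :: spSplit r else (spSplit r).modifyHead (c :: ·)

theorem spSplit_ne_nil (t : List Char) : spSplit t ≠ [] := by
  induction t with
  | nil => simp [spSplit]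
  | cons c r ih =>
    simp only [spSplit]
    split_ifs
    · simp
    · rcases h : spSplit r with _ | ⟨h0, tl⟩
      · exact absurd h ih
      · simp

theorem go_space (fuel : Nat) : ∀ (l cur : List Char) (acc : List (List Char)),
    l.length < fuel →
    PySem.Chars.splitOn.go [' '] fuel l cur acc
      = acc.reverse ++ (spSplit l).modifyHead (cur.reverse ++ ·) := by
  induction fuel with
  | zero => intro l cur acc h; omega
  | succ n ih =>
    intro l cur acc h
    cases l with
    | nil =>
      show (cur.reverse :: acc).reverse = _
      simp [spSplit]
    | cons c rest =>
      show (if ([' '] : List Char).isPrefixOf (c :: rest)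
              then PySem.Chars.splitOn.go [' '] n (List.drop ([' '] : List Char).length (c :: rest)) [] (cur.reverse :: acc)
              else PySem.Chars.splitOn.go [' '] n rest (c :: cur) acc) = _
      by_cases hc : c = ' '
      · subst hc
        rw [if_pos (by simp [List.isPrefixOf])]
        rw [ih _ _ _ (by simpa using h)]
        rcases hr : spSplit rest with _ | ⟨h0, tl⟩
        · exact absurd hr (spSplit_ne_nil rest)
        · simp [spSplit, hr]
      · rw [if_neg (by simp [List.isPrefixOf, Ne.symm hc])]
        rw [ih _ _ _ (by simpa using h)]
        rcases hr : spSplit rest with _ | ⟨h0, tl⟩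
        · exact absurd hr (spSplit_ne_nil rest)
        · simp [spSplit, hc, hr]

theorem splitOn_space (t : List Char) :
    PySem.Chars.splitOn t [' '] = spSplit t := by
  show PySem.Chars.splitOn.go [' '] (t.length + 1) t [] [] = spSplit t
  rw [go_space (t.length + 1) t [] [] (by omega)]
  rcases h : spSplit t with _ | ⟨h0, tl⟩
  · exact absurd h (spSplit_ne_nil t)
  · simp

theorem prefix_tok : ∀ (t w : List Char), ' ' ∉ w →
    ((w ++ [' ']) <+: (t ++ [' ']) ↔ (spSplit t).headI = w) := by
  intro t
  induction t with
  | nil =>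
    intro w hw
    cases w with
    | nil => simp [spSplit]
    | cons a w' =>
      simp only [spSplit, List.headI, List.cons_append, List.cons_prefix_cons, List.nil_append]
      constructor
      · rintro ⟨ha, hp⟩
        exact absurd (List.prefix_nil.mp hp) (by simp)
      · intro he; exact absurd he.symm (by simp)
  | cons c r ih =>
    intro w hw
    by_cases hc : c = ' '
    · subst hc
      cases w with
      | nil => simp [spSplit]
      | cons a w' =>
        have ha : a ≠ ' ' := fun h => hw (by simp [h])
        simp [spSplit, List.cons_prefix_cons, ha]
    · rcases hr : spSplit r with _ | ⟨h0, tl⟩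
      · exact absurd hr (spSplit_ne_nil r)
      · cases w with
        | nil =>
          simp [spSplit, hc, hr, List.cons_prefix_cons, Ne.symm hc]
        | cons a w' =>
          have hw' : ' ' ∉ w' := fun h => hw (by simp [h])
          have hih := ih w' hw'
          rw [hr] at hih
          simp only [List.headI] at hih
          simp only [spSplit, if_neg hc, hr, List.modifyHead, List.headI,
            List.cons_append, List.cons_prefix_cons]
          rw [hih]
          constructor
          · rintro ⟨h1, h2⟩; exact by simp [h1, h2]
          · intro h; injection h with h1 h2; exact ⟨h1.symm, h2⟩

theorem infix_tail : ∀ (t w : List Char), ' ' ∉ w → w ≠ [] →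
    ((' ' :: w ++ [' ']) <:+: (t ++ [' ']) ↔ w ∈ (spSplit t).tail) := by
  intro t
  induction t with
  | nil =>
    intro w hw hne
    simp only [spSplit, List.tail, List.nil_append]
    constructor
    · intro h
      have := h.length_le
      simp at this
    · intro h; simp at h
  | cons c r ih =>
    intro w hw hne
    have ihr := ih w hw hne
    rcases hr : spSplit r with _ | ⟨h0, tl⟩
    · exact absurd hr (spSplit_ne_nil r)
    rw [hr] at ihr
    simp only [List.tail] at ihr
    simp only [List.cons_append] at ihr ⊢
    rw [List.infix_cons_iff, List.cons_prefix_cons]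
    by_cases hc : c = ' '
    · subst hc
      have hpt := prefix_tok r w hw
      rw [hr] at hpt
      simp only [List.headI] at hpt
      have htail : (spSplit (' ' :: r)).tail = h0 :: tl := by simp [spSplit, hr]
      rw [htail]
      simp only [List.mem_cons]
      constructor
      · rintro (⟨-, hp⟩ | hm)
        · exact Or.inl (hpt.mp hp).symm
        · exact Or.inr (ihr.mp hm)
      · rintro (he | hm)
        · exact Or.inl ⟨by trivial, hpt.mpr he.symm⟩
        · exact Or.inr (ihr.mpr hm)
    · have htail : (spSplit (c :: r)).tail = tl := by simp [spSplit, hc, hr]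
      rw [htail]
      constructor
      · rintro (⟨he, -⟩ | hm)
        · exact absurd he.symm hc
        · exact ihr.mp hm
      · intro hm
        exact Or.inr (ihr.mpr hm)

theorem isIn_pad (t w : List Char) (hw : ' ' ∉ w) (hne : w ≠ []) :
    PySem.Chars.isIn (' ' :: w ++ [' ']) (' ' :: t ++ [' ']) = decide (w ∈ spSplit t) := by
  rcases hr : spSplit t with _ | ⟨h0, tl⟩
  · exact absurd hr (spSplit_ne_nil t)
  · have hpt := prefix_tok t w hw
    have hit := infix_tail t w hw hne
    rw [hr] at hpt hit
    simp only [List.headI, List.tail] at hpt hit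
    have hiff : PySem.Chars.isIn (' ' :: w ++ [' ']) (' ' :: t ++ [' ']) = true
        ↔ w ∈ h0 :: tl := by
      rw [PySem.Chars.isIn_iff_infix]
      simp only [List.cons_append]
      rw [List.infix_cons_iff, List.cons_prefix_cons]
      simp only [List.cons_append] at hit
      simp only [List.mem_cons]
      constructor
      · rintro (⟨-, hp⟩ | hinf)
        · exact Or.inl (hpt.mp hp).symm
        · exact Or.inr (hit.mp hinf)
      · rintro (he | hm)
        · exact Or.inl ⟨by trivial, hpt.mpr he.symm⟩
        · exact Or.inr (hit.mpr hm)
    rcases h : PySem.Chars.isIn (' ' :: w ++ [' ']) (' ' :: t ++ [' ']) with _ | _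
    · rw [h] at hiff
      have hm : w ∉ h0 :: tl := fun hm => by simpa using hiff.mpr hm
      simp [hm]
    · rw [h] at hiff
      simp [hiff.mp rfl]

-- the set B's loop would have accumulated after consuming the whole token list
def finalF (common : PySem.Set (List Char)) (found : PySem.Set (List Char))
    (toks : List (List Char)) : PySem.Set (List Char) :=
  toks.foldl (fun s w => if PySem.Set.contains common w then PySem.Set.add s w else s) found

theorem length_le_finalF (common found : PySem.Set (List Char)) (toks : List (List Char)) :
    found.length ≤ (finalF common found toks).length := by
  induction toks generalizing found with
  | nil => exact le_refl _
  | cons w rest ih =>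
    simp only [finalF, List.foldl]
    split_ifs
    · refine le_trans ?_ (ih (PySem.Set.add found w))
      rw [PySem.Set.add_eq_ite]
      split_ifs <;> simp
    · exact ih found

theorem bLoop_eq_finalF (common : PySem.Set (List Char)) (toks : List (List Char))
    (found : PySem.Set (List Char)) (hle : found.length ≤ 1) :
    bLoop common found toks = decide (2 ≤ (finalF common found toks).length) := by
  induction toks generalizing found with
  | nil =>
    simp only [bLoop, finalF, List.foldl]
    have h2 : ¬ (2 ≤ found.length) := by omega
    simp [h2]
  | cons w rest ih =>
    simp only [bLoop, finalF, List.foldl]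
    by_cases hc : PySem.Set.contains common w = true
    · simp only [if_pos hc]
      by_cases h2 : 2 ≤ PySem.Set.len (PySem.Set.add found w)
      · rw [if_pos h2]
        have hlen : 2 ≤ (PySem.Set.add found w).length := by
          simpa [PySem.Set.len] using h2
        have := length_le_finalF common (PySem.Set.add found w) rest
        have : 2 ≤ (finalF common (PySem.Set.add found w) rest).length := le_trans hlen this
        simpa [finalF] using (decide_eq_true this).symm
      · rw [if_neg h2]
        have hlen : (PySem.Set.add found w).length ≤ 1 := by
          simp only [PySem.Set.len] at h2
          omega
        exact ih (PySem.Set.add found w) hlen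
    · simp only [if_neg hc]
      exact ih found hle

theorem mem_finalF (common found : PySem.Set (List Char)) (toks : List (List Char))
    (x : List Char) :
    x ∈ finalF common found toks
      ↔ x ∈ found ∨ (x ∈ toks ∧ PySem.Set.contains common x = true) := by
  induction toks generalizing found with
  | nil => simp [finalF]
  | cons w rest ih =>
    simp only [finalF, List.foldl] at ih ⊢
    by_cases hc : PySem.Set.contains common w = true
    · rw [if_pos hc, ih]
      rw [PySem.Set.mem_add]
      constructor
      · rintro (⟨hf | he⟩ | ⟨hm, hx⟩)
        · exact Or.inl hf
        · subst he; exact Or.inr ⟨by simp, hc⟩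
        · exact Or.inr ⟨by simp [hm], hx⟩
      · rintro (hf | ⟨hm, hx⟩)
        · exact Or.inl (Or.inl hf)
        · rcases List.mem_cons.mp hm with he | hm'
          · subst he; exact Or.inl (Or.inr rfl)
          · exact Or.inr ⟨hm', hx⟩
    · rw [if_neg hc, ih]
      constructor
      · rintro (hf | ⟨hm, hx⟩)
        · exact Or.inl hf
        · exact Or.inr ⟨by simp [hm], hx⟩
      · rintro (hf | ⟨hm, hx⟩)
        · exact Or.inl hf
        · rcases List.mem_cons.mp hm with he | hm'
          · subst he; exact absurd hx hc
          · exact Or.inr ⟨hm', hx⟩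

theorem nodup_finalF (common found : PySem.Set (List Char)) (toks : List (List Char))
    (hnd : found.Nodup) : (finalF common found toks).Nodup := by
  induction toks generalizing found with
  | nil => exact hnd
  | cons w rest ih =>
    simp only [finalF, List.foldl]
    split_ifs
    · exact ih _ (PySem.Set.nodup_add found w hnd)
    · exact ih _ hnd

-- ===== VERDICT (by name: the statement is the Claim_ definition above) =====
theorem likely_english_spec : Claim_equal_likely_english := by
  unfold Claim_equal_likely_english Spec_likely_english
  intro text _
  simp only [likely_english, likely_english_alt]
  generalize text.toList = cs
  by_cases hcs : cs = []
  · subst hcs; decide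
  · rw [if_neg hcs, splitOn_space]
    set toks := spSplit (PySem.Chars.lower cs) with htoks
    set commonL : List (List Char) :=
      ["the".toList, "and".toList, "is".toList, "i".toList, "you".toList,
       "to".toList, "of".toList, "that".toList, "it".toList] with hcommonL
    have hofl : PySem.Set.ofList commonL = commonL := by decide
    rw [PySem.List.foldl_count_if
      (fun w => PySem.Chars.isIn w (' ' :: PySem.Chars.lower cs ++ [' ']))]
    have hmap : ([" the ".toList, " and ".toList, " is ".toList, " i ".toList, " you ".toList,
        " to ".toList, " of ".toList, " that ".toList, " it ".toList] : List (List Char))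
        = commonL.map (fun w => ' ' :: w ++ [' ']) := by decide
    rw [hmap, List.countP_map]
    have hcnt : List.countP
        ((fun w => PySem.Chars.isIn w (' ' :: PySem.Chars.lower cs ++ [' ']))
          ∘ (fun w => ' ' :: w ++ [' '])) commonL
        = List.countP (fun w => decide (w ∈ toks)) commonL := by
      apply List.countP_congr
      intro w hw
      rw [hcommonL] at hw
      have hside : ' ' ∉ w ∧ w ≠ [] := by
        fin_cases hw <;> exact ⟨by decide, by decide⟩
      simp only [Function.comp_apply]
      rw [isIn_pad _ w hside.1 hside.2, htoks]
    rw [hcnt]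
    -- B side: unfold the loop to the final accumulated set
    rw [bLoop_eq_finalF (PySem.Set.ofList commonL) toks PySem.Set.empty (by simp [PySem.Set.empty])]
    -- the accumulated set is a permutation of the filtered common-word list
    have hperm : (commonL.filter (fun w => decide (w ∈ toks))).Perm
        (finalF (PySem.Set.ofList commonL) PySem.Set.empty toks) := by
      rw [List.perm_ext_iff_of_nodup
        (List.Nodup.filter _ (by rw [hcommonL]; decide))
        (nodup_finalF _ _ _ (by simp [PySem.Set.empty]))]
      intro x
      rw [List.mem_filter, mem_finalF]
      constructor
      · rintro ⟨hxc, hxt⟩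
        refine Or.inr ⟨of_decide_eq_true hxt, ?_⟩
        rw [(PySem.Set.contains_iff _ _), PySem.Set.mem_ofList]
        exact hxc
      · rintro (hf | ⟨hxt, hxc⟩)
        · simp [PySem.Set.empty] at hf
        · refine ⟨?_, decide_eq_true hxt⟩
          rw [← PySem.Set.mem_ofList, ← PySem.Set.contains_iff]
          exact hxc
    have hlen : List.countP (fun w => decide (w ∈ toks)) commonL
        = (finalF (PySem.Set.ofList commonL) PySem.Set.empty toks).length := by
      rw [List.countP_eq_length_filter]
      exact hperm.length_eq
    rw [decide_eq_decide]
    rw [hlen]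
    omega
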